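-- pv_equiv track=rewrite | github.com/jkwang93/Atom-Path-Descriptor-based-machine-learning | V6_mol2_converter.py | preorder_tree_atom_index
-- ===== SOURCE A (Python) =====
-- def preorder_tree_atom_index(center_atom_index, atom_index, pre_atom, R, max_R, table_re, list_atom_index):
--     if R <= max_R:
--         R += 1
--         fix_pre_atom = pre_atom
--         for item in table_re[atom_index]:
--             if item != -1 and item != fix_pre_atom:  # 排除none以及atom_index本身
--                 pre_atom = atom_index
--                 preorder_tree_atom_index(center_atom_index, item, pre_atom, R, max_R, table_re, list_atom_index)
--     else:
--         # list_distance.append(atom_direction(table_coordinate[center_atom_index], table_coordinate[atom_index]))  # 距离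
--         # list_atom_type.append(table_atom_name_charge[atom_index][0])  # atom_type
--         list_atom_index.append(atom_index)
--     return list_atom_index
-- ===== SOURCE B (Python) =====
-- def preorder_tree_atom_index(center_atom_index, atom_index, pre_atom, R, max_R, table_re, list_atom_index):
--     frontier = [(atom_index, pre_atom)]
--     for _ in range(max_R - R + 1):
--         if not frontier:
--             break
--         frontier = [(item, a)
--                     for (a, p) in frontier
--                     for item in table_re[a]
--                     if item != -1 and item != p]
--     list_atom_index.extend(a for (a, _) in frontier)
--     return list_atom_index
-- ===== Notes on version B (the rewrite author's own statement) =====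
-- stated objective: alternative
-- what changed: Replaces A's depth-bounded DFS recursion by an iterative level-synchronous frontier expansion (all appended leaves lie at the same depth max_R+1, so expanding the whole frontier level by level yields exactly A's left-to-right leaf order).
import Mathlib
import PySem

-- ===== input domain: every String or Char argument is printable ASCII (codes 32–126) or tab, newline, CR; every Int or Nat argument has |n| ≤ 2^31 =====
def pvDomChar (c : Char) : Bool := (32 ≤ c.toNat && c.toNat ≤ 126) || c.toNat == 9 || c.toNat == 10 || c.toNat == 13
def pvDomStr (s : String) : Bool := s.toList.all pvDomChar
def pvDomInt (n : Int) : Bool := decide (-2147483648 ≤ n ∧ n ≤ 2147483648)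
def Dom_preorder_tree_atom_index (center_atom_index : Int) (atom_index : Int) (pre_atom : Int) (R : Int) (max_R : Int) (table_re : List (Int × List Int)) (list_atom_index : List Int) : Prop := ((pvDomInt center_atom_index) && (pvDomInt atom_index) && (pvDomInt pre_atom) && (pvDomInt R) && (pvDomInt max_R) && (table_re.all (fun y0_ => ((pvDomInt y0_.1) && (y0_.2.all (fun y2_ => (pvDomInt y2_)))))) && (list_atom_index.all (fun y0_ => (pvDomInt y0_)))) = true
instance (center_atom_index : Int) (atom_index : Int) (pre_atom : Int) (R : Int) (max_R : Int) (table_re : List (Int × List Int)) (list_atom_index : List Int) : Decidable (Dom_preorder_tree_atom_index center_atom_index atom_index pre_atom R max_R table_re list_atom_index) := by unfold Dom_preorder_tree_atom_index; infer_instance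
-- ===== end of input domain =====

-- B replaces A's depth-bounded DFS recursion by an iterative level-synchronous frontier
-- expansion (all leaves sit at the same depth, so the BFS frontier at the last level is
-- exactly A's preorder leaf list); equivalence is about the RETURN value — both Pythons
-- also mutate list_atom_index in place in the same way.

-- ===== PORT A =====
-- dict lookup table_re[k], first-match association lookup ([] default outside Pre_,
-- where Python raises KeyError).
def pvChildren (table_re : List (Int × List Int)) (k : Int) : List Int :=
  ((table_re.find? (fun kv => kv.1 == k)).map Prod.snd).getD []

-- A's recursion, fuel = max_R - R + 1 (R strictly increases each level, so this is exact).
def pvGoA (table_re : List (Int × List Int)) (max_R : Int) :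
    Nat → Int → Int → Int → List Int → List Int
  | 0, atom_index, _, _, acc => acc ++ [atom_index]
  | Nat.succ n, atom_index, pre_atom, r, acc =>
      if r ≤ max_R then
        (pvChildren table_re atom_index).foldl
          (fun acc2 item =>
            if item ≠ -1 ∧ item ≠ pre_atom then
              pvGoA table_re max_R n item atom_index (r + 1) acc2
            else acc2) acc
      else acc ++ [atom_index]

def preorder_tree_atom_index (center_atom_index : Int) (atom_index : Int) (pre_atom : Int) (R : Int) (max_R : Int) (table_re : List (Int × List Int)) (list_atom_index : List Int) : List Int :=
  pvGoA table_re max_R (max_R - R + 1).toNat atom_index pre_atom R list_atom_index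

-- ===== PORT B =====
-- one loop iteration: expand every frontier frame (atom, pre) into its admissible children
def pvExpand (table_re : List (Int × List Int)) (fr : List (Int × Int)) : List (Int × Int) :=
  fr.flatMap (fun ap =>
    ((pvChildren table_re ap.1).filter (fun item => item ≠ -1 ∧ item ≠ ap.2)).map
      (fun item => (item, ap.1)))

-- the for-loop over range(max_R - R + 1), with the early break on an empty frontier
def pvIter (table_re : List (Int × List Int)) : Nat → List (Int × Int) → List (Int × Int)
  | 0, fr => fr
  | Nat.succ n, fr => if fr = [] then fr else pvIter table_re n (pvExpand table_re fr)

def preorder_tree_atom_index_alt (center_atom_index : Int) (atom_index : Int) (pre_atom : Int) (R : Int) (max_R : Int) (table_re : List (Int × List Int)) (list_atom_index : List Int) : List Int :=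
  list_atom_index ++
    (pvIter table_re (max_R - R + 1).toNat [(atom_index, pre_atom)]).map Prod.fst

-- ===== PRECONDITION & SPEC =====
-- pvLookupsOk mirrors exactly the dict lookups A performs: at a node with r <= max_R the
-- key must be present and every admissible child is checked one level deeper; where r > max_R
-- no lookup happens. It decides precisely whether Python A returns (true) or raises KeyError
-- (false); it inspects only the input and computes no output of either program.
def pvLookupsOk (t : List (Int × List Int)) (max_R : Int) : Nat → Int → Int → Int → Bool
  | 0, _, _, _ => true
  | Nat.succ n, a, p, r =>
      if r ≤ max_R then
        match t.find? (fun kv => kv.1 == a) with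
        | none => false
        | some kv =>
            kv.2.all (fun item =>
              if item ≠ -1 ∧ item ≠ p then pvLookupsOk t max_R n item a (r + 1) else true)
      else true

-- Pre_ excludes exactly the inputs on which Python A raises KeyError: those where the
-- depth-bounded traversal reads a key missing from table_re.
def Pre_preorder_tree_atom_index (center_atom_index : Int) (atom_index : Int) (pre_atom : Int) (R : Int) (max_R : Int) (table_re : List (Int × List Int)) (list_atom_index : List Int) : Prop :=
  pvLookupsOk table_re max_R (max_R - R + 1).toNat atom_index pre_atom R = true
instance (center_atom_index : Int) (atom_index : Int) (pre_atom : Int) (R : Int) (max_R : Int) (table_re : List (Int × List Int)) (list_atom_index : List Int) : Decidable (Pre_preorder_tree_atom_index center_atom_index atom_index pre_atom R max_R table_re list_atom_index) := by unfold Pre_preorder_tree_atom_index; infer_instance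

def pvWitness_preorder_tree_atom_index : Int × Int × Int × Int × Int × (List (Int × List Int)) × List Int :=
  (0, 0, -2, 0, 1, [(0, [1, -1]), (1, [0, 2]), (2, [])], [9])

def Spec_preorder_tree_atom_index (center_atom_index : Int) (atom_index : Int) (pre_atom : Int) (R : Int) (max_R : Int) (table_re : List (Int × List Int)) (list_atom_index : List Int) (out : List Int) : Prop := out = preorder_tree_atom_index_alt center_atom_index atom_index pre_atom R max_R table_re list_atom_index
instance (center_atom_index : Int) (atom_index : Int) (pre_atom : Int) (R : Int) (max_R : Int) (table_re : List (Int × List Int)) (list_atom_index : List Int) (out : List Int) : Decidable (Spec_preorder_tree_atom_index center_atom_index atom_index pre_atom R max_R table_re list_atom_index out) := by unfold Spec_preorder_tree_atom_index; infer_instance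

-- ===== CLAIM (what is proved, stated in full; the proofs are below) =====
def Claim_equal_preorder_tree_atom_index : Prop := ∀ (center_atom_index : Int) (atom_index : Int) (pre_atom : Int) (R : Int) (max_R : Int) (table_re : List (Int × List Int)) (list_atom_index : List Int), Dom_preorder_tree_atom_index center_atom_index atom_index pre_atom R max_R table_re list_atom_index → Pre_preorder_tree_atom_index center_atom_index atom_index pre_atom R max_R table_re list_atom_index → Spec_preorder_tree_atom_index center_atom_index atom_index pre_atom R max_R table_re list_atom_index (preorder_tree_atom_index center_atom_index atom_index pre_atom R max_R table_re list_atom_index)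

-- ===== LEMMAS AND PROOFS =====
lemma pvExpand_append (t : List (Int × List Int)) (f1 f2 : List (Int × Int)) :
    pvExpand t (f1 ++ f2) = pvExpand t f1 ++ pvExpand t f2 := by
  simp [pvExpand]

lemma pvIter_append (t : List (Int × List Int)) (n : Nat) (f1 f2 : List (Int × Int)) :
    pvIter t n (f1 ++ f2) = pvIter t n f1 ++ pvIter t n f2 := by
  induction n generalizing f1 f2 with
  | zero => rfl
  | succ n ih =>
    by_cases h1 : f1 = [] <;> by_cases h2 : f2 = [] <;>
      simp [pvIter, pvExpand_append, ih, h1, h2]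

lemma pvIter_nil (t : List (Int × List Int)) (n : Nat) : pvIter t n [] = [] := by
  induction n with
  | zero => rfl
  | succ n ih => simp [pvIter]

lemma pvGoA_eq_iter (t : List (Int × List Int)) (max_R : Int) (n : Nat) :
    ∀ (a p r : Int) (acc : List Int), (max_R - r + 1).toNat = n →
      pvGoA t max_R n a p r acc = acc ++ (pvIter t n [(a, p)]).map Prod.fst := by
  induction n with
  | zero => intro a p r acc _; simp [pvGoA, pvIter]
  | succ n ih =>
    intro a p r acc hn
    have hpos : max_R - r + 1 = (n : Int) + 1 := by omega
    have hr : r ≤ max_R := by omega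
    have hchild : (max_R - (r + 1) + 1).toNat = n := by omega
    have inner : ∀ (l : List Int) (acc : List Int),
        l.foldl (fun acc2 item =>
          if item ≠ -1 ∧ item ≠ p then pvGoA t max_R n item a (r + 1) acc2 else acc2) acc
        = acc ++ (pvIter t n ((l.filter (fun item => item ≠ -1 ∧ item ≠ p)).map
            (fun item => (item, a)))).map Prod.fst := by
      intro l
      induction l with
      | nil => intro acc; simp [pvIter_nil]
      | cons x xs ihx =>
        intro acc
        by_cases hx : x ≠ -1 ∧ x ≠ p
        · have : ((x :: xs).filter (fun item => item ≠ -1 ∧ item ≠ p)).map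
              (fun item => (item, a))
              = [(x, a)] ++ (xs.filter (fun item => item ≠ -1 ∧ item ≠ p)).map
                  (fun item => (item, a)) := by
            simp [hx]
          simp only [List.foldl_cons, if_pos hx, ihx, ih x a (r + 1) acc hchild, this,
            pvIter_append, List.map_append, List.append_assoc]
        · have : ((x :: xs).filter (fun item => item ≠ -1 ∧ item ≠ p))
              = xs.filter (fun item => item ≠ -1 ∧ item ≠ p) := by
            simp [hx]
          simp only [List.foldl_cons, if_neg hx, ihx, this]
    have hexp : pvExpand t [(a, p)] = ((pvChildren t a).filter
        (fun item => item ≠ -1 ∧ item ≠ p)).map (fun item => (item, a)) := by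
      simp [pvExpand]
    have hne : ¬ (([(a, p)] : List (Int × Int)) = []) := by simp
    simp only [pvGoA, if_pos hr, pvIter, if_neg hne, hexp, inner]

-- ===== VERDICT (by name: the statement is the Claim_ definition above) =====
theorem preorder_tree_atom_index_spec : Claim_equal_preorder_tree_atom_index := by
  intro c a p R mR t l _ _
  unfold Spec_preorder_tree_atom_index preorder_tree_atom_index preorder_tree_atom_index_alt
  exact pvGoA_eq_iter t mR _ a p R l rfl
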